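-- pv_equiv track=rewrite | github.com/dbrown540/CallAnalysis | delete.py | call_type_breakdown
-- ===== SOURCE A (Python) =====
-- def call_type_breakdown(call_data):
--     breakdown = {
--         "Canceled": 0,
--         "Total Missed": 0,
--         "Outgoing": 0,
--         "Incoming": 0,
--         "Missed Outgoing": 0,
--         "Missed Incoming": 0
--     }
--
--     for date, calls in call_data.items():
--         for call_type, value in calls:
--             if call_type == "status":
--                 if value == "Canceled":
--                     breakdown["Canceled"] += 1
--             elif call_type == "outgoing":
--                 breakdown["Outgoing"] += 1
--             elif call_type == "incoming":
--                 breakdown["Incoming"] += 1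
--             elif call_type == "missed_by":
--                 if value == "outgoing":
--                     breakdown["Missed Outgoing"] += 1
--                 elif value == "incoming":
--                     breakdown["Missed Incoming"] += 1
--                 breakdown["Total Missed"] += 1
--
--     return breakdown
-- ===== SOURCE B (Python) =====
-- def call_type_breakdown(call_data):
--     flat = [pair for calls in call_data.values() for pair in calls]
--     types = [pair[0] for pair in flat]
--     return {
--         "Canceled": flat.count(("status", "Canceled")),
--         "Total Missed": types.count("missed_by"),
--         "Outgoing": types.count("outgoing"),
--         "Incoming": types.count("incoming"),
--         "Missed Outgoing": flat.count(("missed_by", "outgoing")),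
--         "Missed Incoming": flat.count(("missed_by", "incoming")),
--     }
-- ===== Notes on version B (the rewrite author's own statement) =====
-- stated objective: alternative
-- what changed: Replaces A's single pass with a mutable pre-seeded breakdown dict and per-element if/elif dispatch by a declarative staged computation: flatten all (call_type, value) pairs once, then obtain each of the six fields by an independent list.count pass over the flattened data (no accumulator, no branching).
import Mathlib
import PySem

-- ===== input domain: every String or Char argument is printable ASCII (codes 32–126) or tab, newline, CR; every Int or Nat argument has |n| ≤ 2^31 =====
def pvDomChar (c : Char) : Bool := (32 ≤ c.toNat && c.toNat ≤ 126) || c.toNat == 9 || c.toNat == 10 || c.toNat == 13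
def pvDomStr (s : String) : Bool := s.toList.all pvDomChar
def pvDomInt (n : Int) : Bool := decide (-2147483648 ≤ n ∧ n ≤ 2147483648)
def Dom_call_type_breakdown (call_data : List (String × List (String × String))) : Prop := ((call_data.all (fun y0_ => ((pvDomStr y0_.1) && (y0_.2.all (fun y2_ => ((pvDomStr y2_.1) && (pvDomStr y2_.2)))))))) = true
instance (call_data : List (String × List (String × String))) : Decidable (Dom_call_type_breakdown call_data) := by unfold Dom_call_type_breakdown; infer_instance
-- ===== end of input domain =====

-- B flattens all pairs once and derives each of the six fields by an independent
-- list.count pass, instead of A's single accumulating pass with if/elif dispatch; objective: alternative.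

-- ===== PORT A =====
-- one body of A's inner loop: the if/elif dispatch on (call_type, value)
def pvAStep (b : PySem.Dict String Int) (cv : String × String) : PySem.Dict String Int :=
  match cv with
  | (call_type, value) =>
    if call_type = "status" then
      if value = "Canceled" then b.modify "Canceled" 0 (· + 1) else b
    else if call_type = "outgoing" then b.modify "Outgoing" 0 (· + 1)
    else if call_type = "incoming" then b.modify "Incoming" 0 (· + 1)
    else if call_type = "missed_by" then
      let b := if value = "outgoing" then b.modify "Missed Outgoing" 0 (· + 1)
               else if value = "incoming" then b.modify "Missed Incoming" 0 (· + 1)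
               else b
      b.modify "Total Missed" 0 (· + 1)
    else b

def call_type_breakdown (call_data : List (String × List (String × String))) : List (String × Int) :=
  let breakdown : PySem.Dict String Int :=
    PySem.Dict.ofList [("Canceled", 0), ("Total Missed", 0), ("Outgoing", 0),
                       ("Incoming", 0), ("Missed Outgoing", 0), ("Missed Incoming", 0)]
  let breakdown := call_data.foldl (fun b p => p.2.foldl pvAStep b) breakdown
  breakdown.items

-- ===== PORT B =====
def call_type_breakdown_alt (call_data : List (String × List (String × String))) : List (String × Int) :=
  let flat := call_data.flatMap (·.2)              -- [pair for calls in call_data.values() for pair in calls]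
  let types := flat.map (·.1)                      -- [pair[0] for pair in flat]
  [("Canceled", (PySem.List.count flat ("status", "Canceled") : Int)),
   ("Total Missed", (PySem.List.count types "missed_by" : Int)),
   ("Outgoing", (PySem.List.count types "outgoing" : Int)),
   ("Incoming", (PySem.List.count types "incoming" : Int)),
   ("Missed Outgoing", (PySem.List.count flat ("missed_by", "outgoing") : Int)),
   ("Missed Incoming", (PySem.List.count flat ("missed_by", "incoming") : Int))]

-- ===== PRECONDITION & SPEC =====
def Spec_call_type_breakdown (call_data : List (String × List (String × String))) (out : List (String × Int)) : Prop := out = call_type_breakdown_alt call_data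
instance (call_data : List (String × List (String × String))) (out : List (String × Int)) : Decidable (Spec_call_type_breakdown call_data out) := by unfold Spec_call_type_breakdown; infer_instance

-- ===== CLAIM =====
def Claim_equal_call_type_breakdown : Prop := ∀ (call_data : List (String × List (String × String))), Dom_call_type_breakdown call_data → Spec_call_type_breakdown call_data (call_type_breakdown call_data)

-- ===== LEMMAS AND PROOFS =====

-- nested foldl over the values of the association list = foldl over the flattened pair list
lemma foldl_inner_eq_flat {σ α β : Type} (g : σ → β → σ) :
    ∀ (l : List (α × List β)) (s : σ),
      l.foldl (fun s p => p.2.foldl g s) s = (l.flatMap (·.2)).foldl g s := by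
  intro l
  induction l with
  | nil => intro s; rfl
  | cons x xs ih => intro s; simp [List.flatMap_cons, List.foldl_append, ih]

-- the six "breakdown[k] += 1" updates of A, on the literal-keyed dict (proved by unfolding Dict)
lemma mod_c (c t o i mo mi : Int) :
    (PySem.Dict.ofList [("Canceled", c), ("Total Missed", t), ("Outgoing", o),
      ("Incoming", i), ("Missed Outgoing", mo), ("Missed Incoming", mi)]).modify "Canceled" 0 (· + 1) =
    PySem.Dict.ofList [("Canceled", c + 1), ("Total Missed", t), ("Outgoing", o),
      ("Incoming", i), ("Missed Outgoing", mo), ("Missed Incoming", mi)] := by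
  simp [PySem.Dict.modify, PySem.Dict.ofList, PySem.Dict.update, PySem.Dict.empty,
        PySem.Dict.get?, PySem.Dict.getD, PySem.Dict.insert, PySem.Dict.contains]

lemma mod_t (c t o i mo mi : Int) :
    (PySem.Dict.ofList [("Canceled", c), ("Total Missed", t), ("Outgoing", o),
      ("Incoming", i), ("Missed Outgoing", mo), ("Missed Incoming", mi)]).modify "Total Missed" 0 (· + 1) =
    PySem.Dict.ofList [("Canceled", c), ("Total Missed", t + 1), ("Outgoing", o),
      ("Incoming", i), ("Missed Outgoing", mo), ("Missed Incoming", mi)] := by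
  simp [PySem.Dict.modify, PySem.Dict.ofList, PySem.Dict.update, PySem.Dict.empty,
        PySem.Dict.get?, PySem.Dict.getD, PySem.Dict.insert, PySem.Dict.contains]

lemma mod_o (c t o i mo mi : Int) :
    (PySem.Dict.ofList [("Canceled", c), ("Total Missed", t), ("Outgoing", o),
      ("Incoming", i), ("Missed Outgoing", mo), ("Missed Incoming", mi)]).modify "Outgoing" 0 (· + 1) =
    PySem.Dict.ofList [("Canceled", c), ("Total Missed", t), ("Outgoing", o + 1),
      ("Incoming", i), ("Missed Outgoing", mo), ("Missed Incoming", mi)] := by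
  simp [PySem.Dict.modify, PySem.Dict.ofList, PySem.Dict.update, PySem.Dict.empty,
        PySem.Dict.get?, PySem.Dict.getD, PySem.Dict.insert, PySem.Dict.contains]

lemma mod_i (c t o i mo mi : Int) :
    (PySem.Dict.ofList [("Canceled", c), ("Total Missed", t), ("Outgoing", o),
      ("Incoming", i), ("Missed Outgoing", mo), ("Missed Incoming", mi)]).modify "Incoming" 0 (· + 1) =
    PySem.Dict.ofList [("Canceled", c), ("Total Missed", t), ("Outgoing", o),
      ("Incoming", i + 1), ("Missed Outgoing", mo), ("Missed Incoming", mi)] := by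
  simp [PySem.Dict.modify, PySem.Dict.ofList, PySem.Dict.update, PySem.Dict.empty,
        PySem.Dict.get?, PySem.Dict.getD, PySem.Dict.insert, PySem.Dict.contains]

lemma mod_mo (c t o i mo mi : Int) :
    (PySem.Dict.ofList [("Canceled", c), ("Total Missed", t), ("Outgoing", o),
      ("Incoming", i), ("Missed Outgoing", mo), ("Missed Incoming", mi)]).modify "Missed Outgoing" 0 (· + 1) =
    PySem.Dict.ofList [("Canceled", c), ("Total Missed", t), ("Outgoing", o),
      ("Incoming", i), ("Missed Outgoing", mo + 1), ("Missed Incoming", mi)] := by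
  simp [PySem.Dict.modify, PySem.Dict.ofList, PySem.Dict.update, PySem.Dict.empty,
        PySem.Dict.get?, PySem.Dict.getD, PySem.Dict.insert, PySem.Dict.contains]

lemma mod_mi (c t o i mo mi : Int) :
    (PySem.Dict.ofList [("Canceled", c), ("Total Missed", t), ("Outgoing", o),
      ("Incoming", i), ("Missed Outgoing", mo), ("Missed Incoming", mi)]).modify "Missed Incoming" 0 (· + 1) =
    PySem.Dict.ofList [("Canceled", c), ("Total Missed", t), ("Outgoing", o),
      ("Incoming", i), ("Missed Outgoing", mo), ("Missed Incoming", mi + 1)] := by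
  simp [PySem.Dict.modify, PySem.Dict.ofList, PySem.Dict.update, PySem.Dict.empty,
        PySem.Dict.get?, PySem.Dict.getD, PySem.Dict.insert, PySem.Dict.contains]

-- items of A's literal-keyed dict
lemma ofList_items (c t o i mo mi : Int) :
    (PySem.Dict.ofList [("Canceled", c), ("Total Missed", t), ("Outgoing", o),
      ("Incoming", i), ("Missed Outgoing", mo), ("Missed Incoming", mi)]).items =
    [("Canceled", c), ("Total Missed", t), ("Outgoing", o),
     ("Incoming", i), ("Missed Outgoing", mo), ("Missed Incoming", mi)] := by
  simp [PySem.Dict.ofList, PySem.Dict.update, PySem.Dict.empty, PySem.Dict.insert,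
        PySem.Dict.contains]

-- A's fold over the flattened list, from a generalized literal accumulator
lemma a_fold (l : List (String × String)) : ∀ (c t o i mo mi : Int),
    l.foldl pvAStep (PySem.Dict.ofList
      [("Canceled", c), ("Total Missed", t), ("Outgoing", o),
       ("Incoming", i), ("Missed Outgoing", mo), ("Missed Incoming", mi)]) =
    PySem.Dict.ofList
      [("Canceled", c + l.countP (fun x => x == ("status", "Canceled"))),
       ("Total Missed", t + l.countP (fun x => x.1 == "missed_by")),
       ("Outgoing", o + l.countP (fun x => x.1 == "outgoing")),
       ("Incoming", i + l.countP (fun x => x.1 == "incoming")),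
       ("Missed Outgoing", mo + l.countP (fun x => x == ("missed_by", "outgoing"))),
       ("Missed Incoming", mi + l.countP (fun x => x == ("missed_by", "incoming")))] := by
  induction l with
  | nil => intro c t o i mo mi; simp
  | cons x xs ih =>
    intro c t o i mo mi
    obtain ⟨ct, v⟩ := x
    simp only [List.foldl_cons, pvAStep, List.countP_cons]
    by_cases h1 : ct = "status"
    · subst h1
      simp only [String.reduceEq, reduceIte]
      by_cases h2 : v = "Canceled"
      · subst h2
        simp only [reduceIte, mod_c, ih]
        simp
        ring_nf
      · rw [if_neg h2, ih]
        simp [h2]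
    · by_cases h3 : ct = "outgoing"
      · subst h3
        simp only [String.reduceEq, reduceIte, mod_o, ih]
        simp
        ring_nf
      · by_cases h4 : ct = "incoming"
        · subst h4
          simp only [String.reduceEq, reduceIte, mod_i, ih]
          simp
          ring_nf
        · by_cases h5 : ct = "missed_by"
          · subst h5
            simp only [String.reduceEq, reduceIte]
            by_cases h6 : v = "outgoing"
            · subst h6
              simp only [reduceIte, mod_mo, mod_t, ih]
              simp
              ring_nf
            · by_cases h7 : v = "incoming"
              · subst h7
                rw [if_neg h6]
                simp only [reduceIte, mod_mi, mod_t, ih]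
                simp [h6]
                ring_nf
              · rw [if_neg h6, if_neg h7, mod_t, ih]
                simp [h6, h7]
                ring_nf
          · rw [if_neg h1, if_neg h3, if_neg h4, if_neg h5, ih]
            simp [h1, h3, h4, h5]

-- ===== VERDICT =====
theorem call_type_breakdown_spec : Claim_equal_call_type_breakdown := by
  intro call_data _
  unfold Spec_call_type_breakdown
  simp only [call_type_breakdown, call_type_breakdown_alt]
  rw [foldl_inner_eq_flat pvAStep, a_fold, ofList_items]
  simp [PySem.List.count_eq, List.count_eq_countP, List.countP_map, Function.comp_def]
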